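-- pv_equiv track=rewrite | github.com/Yflyfly/Sera-DI | code_script/extract_ifg_from_lrm.py | check_index
-- ===== SOURCE A (Python) =====
-- def check_index(text, char_to_find, separator):
--     separator_index = text.find(separator)
--
--     if separator_index != -1:
--         search_start_index = separator_index + len(separator)
--         substring = text[search_start_index:]
--         indices = []
--         current_index = substring.find(char_to_find)
--         while current_index != -1:
--             actual_index = search_start_index + current_index
--             indices.append(actual_index)
--             current_index = substring.find(char_to_find, current_index + 1)
--         return indices
-- ===== SOURCE B (Python) =====
-- def check_index(text, char_to_find, separator):
--     separator_index = text.find(separator)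
--     if separator_index == -1:
--         return None
--     start = separator_index + len(separator)
--     return [i for i in range(start, len(text) + 1)
--             if text.startswith(char_to_find, i)]
-- ===== Notes on version B (the rewrite author's own statement) =====
-- stated objective: simpler
-- what changed: A's repeated substring.find-from-last-match while loop with manual index rebasing is replaced by a single comprehension that scans every position i in range(start, len(text)+1) and keeps those where text.startswith(char_to_find, i).
import Mathlib
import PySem

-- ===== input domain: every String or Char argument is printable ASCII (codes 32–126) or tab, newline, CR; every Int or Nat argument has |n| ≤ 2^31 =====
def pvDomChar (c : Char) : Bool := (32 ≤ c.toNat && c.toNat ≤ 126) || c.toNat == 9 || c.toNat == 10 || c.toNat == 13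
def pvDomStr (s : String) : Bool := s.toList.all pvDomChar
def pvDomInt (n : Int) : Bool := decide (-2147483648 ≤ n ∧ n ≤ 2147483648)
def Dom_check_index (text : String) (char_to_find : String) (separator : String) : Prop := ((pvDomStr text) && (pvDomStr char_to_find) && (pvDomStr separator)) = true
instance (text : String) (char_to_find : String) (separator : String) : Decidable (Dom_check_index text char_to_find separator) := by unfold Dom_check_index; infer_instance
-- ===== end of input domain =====

-- B replaces A's repeated substring.find loop by one positional startswith sweep over range(start, len(text)+1) (objective: simpler).

-- ===== PORT A =====
-- the while loop: cur = substring.find(char); while cur != -1: append(start+cur); cur = substring.find(char, cur+1)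
-- fuel = u.length + 1 only makes the recursion total; it is never exhausted on the loop's reachable states
def pvLoopA (u c : List Char) (start : Int) (cur : Int) (fuel : Nat) : List Int :=
  match fuel with
  | 0 => []
  | fuel + 1 =>
    if cur = -1 then []
    else (start + cur) :: pvLoopA u c start (PySem.Chars.findFrom u c (cur + 1) none) fuel

def check_index (text : String) (char_to_find : String) (separator : String) : Option (List Int) :=
  let separator_index := PySem.Str.find text separator
  if separator_index ≠ -1 then
    let search_start_index := separator_index + (separator.toList.length : Int)
    let substring := PySem.List.slice text.toList (some search_start_index) none
    some (pvLoopA substring char_to_find.toList search_start_index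
            (PySem.Chars.find substring char_to_find.toList) (substring.length + 1))
  else none

-- ===== PORT B =====
-- [i for i in range(start, len(text)+1) if text.startswith(char_to_find, i)]
-- text.startswith(c, i) with 0 ≤ i is exactly startswith on text.toList.drop i.toNat
def check_index_alt (text : String) (char_to_find : String) (separator : String) : Option (List Int) :=
  let separator_index := PySem.Str.find text separator
  if separator_index = -1 then none
  else
    let start := separator_index + (separator.toList.length : Int)
    some ((PySem.List.pyRange start ((text.toList.length : Int) + 1) 1).filter
      (fun i => PySem.Chars.startswith (text.toList.drop i.toNat) char_to_find.toList))

-- ===== PRECONDITION & SPEC =====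
def Spec_check_index (text : String) (char_to_find : String) (separator : String) (out : Option (List Int)) : Prop := out = check_index_alt text char_to_find separator
instance (text : String) (char_to_find : String) (separator : String) (out : Option (List Int)) : Decidable (Spec_check_index text char_to_find separator out) := by unfold Spec_check_index; infer_instance

-- ===== CLAIM (what is proved, stated in full; the proofs are below) =====
def Claim_equal_check_index : Prop := ∀ (text : String) (char_to_find : String) (separator : String), Dom_check_index text char_to_find separator → Spec_check_index text char_to_find separator (check_index text char_to_find separator)

-- ===== LEMMAS AND PROOFS =====

lemma pvLoopA_neg_one (u c : List Char) (start : Int) (fuel : Nat) :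
    pvLoopA u c start (-1) fuel = [] := by
  cases fuel <;> simp [pvLoopA]

lemma pvFindFrom_past (u c : List Char) (k : Int) (h : (u.length : Int) < k) :
    PySem.Chars.findFrom u c k none = -1 := by
  simp only [PySem.Chars.findFrom]
  have h0 : ¬ k < 0 := by omega
  simp [h0]
  omega

lemma pvPrefix_drop_infix (u c : List Char) (k i : Nat) (hk : k ≤ i)
    (h : c <+: u.drop i) : c <:+: u.drop k := by
  have he : u.drop i = (u.drop k).drop (i - k) := by
    rw [List.drop_drop]; congr 1; omega
  rw [he] at h
  exact h.isInfix.trans (List.drop_suffix _ _).isInfix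

lemma pvLoopA_eq (u c : List Char) (start : Int) :
    ∀ fuel k, k ≤ u.length → u.length + 1 - k ≤ fuel →
    pvLoopA u c start (PySem.Chars.findFrom u c (k : Int) none) fuel
      = ((List.range' k (u.length + 1 - k)).filter
          (fun i => PySem.Chars.startswith (u.drop i) c)).map (fun (i : ℕ) => start + (i : ℤ)) := by
  intro fuel
  induction fuel with
  | zero => intro k hk hf; omega
  | succ f ih =>
    intro k hk hf
    by_cases hneg : PySem.Chars.findFrom u c (k : Int) none = -1
    · rw [hneg, pvLoopA_neg_one]
      have hnin : ¬ c <:+: u.drop k := (PySem.Chars.findFrom_natCast_eq_neg_one_iff u c k hk).mp hneg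
      symm
      rw [List.map_eq_nil_iff, List.filter_eq_nil_iff]
      intro i hi hp
      rw [PySem.Chars.startswith_iff] at hp
      exact hnin (pvPrefix_drop_infix u c k i (List.mem_range'_1.mp hi).1 hp)
    · rw [PySem.Chars.findFrom_natCast u c k hk] at hneg ⊢
      have hrne : PySem.Chars.find (u.drop k) c ≠ -1 := by
        intro h; rw [h] at hneg; simp at hneg
      set r := PySem.Chars.find (u.drop k) c with hr
      have hr0 : 0 ≤ r := by have := PySem.Chars.neg_one_le_find (u.drop k) c; omega
      have hrlen : r ≤ (u.length : Int) - k := by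
        have := PySem.Chars.find_le_length (u.drop k) c
        simp [List.length_drop] at this; omega
      have hspec := PySem.Chars.find_spec (s := u.drop k) (sub := c) hr0
      set rn := r.toNat with hrn
      have hm : k + rn ≤ u.length := by omega
      have hpm : c <+: u.drop (k + rn) := by
        have := hspec.1
        rwa [List.drop_drop] at this
      rw [if_neg hrne]
      have hcur : (k : Int) + r ≠ -1 := by omega
      have hsplit : List.range' k (u.length + 1 - k)
          = List.range' k rn ++ List.range' (k + rn) (u.length + 1 - (k + rn)) := by
        have hsum : u.length + 1 - k = rn + (u.length + 1 - (k + rn)) := by omega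
        rw [hsum, ← List.range'_append (step := 1)]
        simp
      rw [hsplit, List.filter_append]
      have hfilt1 : (List.range' k rn).filter (fun i => PySem.Chars.startswith (u.drop i) c) = [] := by
        rw [List.filter_eq_nil_iff]
        intro i hi hp
        obtain ⟨h1, h2⟩ := List.mem_range'_1.mp hi
        rw [PySem.Chars.startswith_iff] at hp
        have hlt := hspec.2 (i - k) (by omega)
        rw [List.drop_drop] at hlt
        have hik : k + (i - k) = i := by omega
        rw [hik] at hlt
        exact hlt hp
      rw [hfilt1]
      have hn1 : u.length + 1 - (k + rn) = (u.length - (k + rn)) + 1 := by omega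
      rw [hn1, List.range'_succ, List.filter_cons]
      rw [if_pos (by rw [PySem.Chars.startswith_iff]; exact hpm)]
      have hrcast : (k : ℤ) + r = ((k + rn : ℕ) : ℤ) := by push_cast; omega
      rw [hrcast]
      have hcur2 : ((k + rn : ℕ) : ℤ) ≠ -1 := by push_cast; omega
      simp only [pvLoopA, if_neg hcur2, List.nil_append, List.map_cons]
      refine congrArg₂ _ rfl ?_
      by_cases hend : k + rn = u.length
      · have hpast : PySem.Chars.findFrom u c (((k + rn : ℕ) : ℤ) + 1) none = -1 := by
          apply pvFindFrom_past; push_cast; omega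
        rw [hpast, pvLoopA_neg_one]
        have hz : u.length - (k + rn) = 0 := by omega
        rw [hz]
        simp
      · have h1 : ((k + rn : ℕ) : ℤ) + 1 = ((k + rn + 1 : ℕ) : ℤ) := by push_cast; ring
        rw [h1, ih (k + rn + 1) (by omega) (by omega)]
        have h2 : u.length + 1 - (k + rn + 1) = u.length - (k + rn) := by omega
        rw [h2]

theorem pv_eq (text char_to_find separator : String) :
    check_index text char_to_find separator = check_index_alt text char_to_find separator := by
  unfold check_index check_index_alt
  simp only [PySem.Str.find_eq]
  set tl := text.toList with htl
  set sl := separator.toList with hsl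
  set cl := char_to_find.toList with hcl
  by_cases h : PySem.Chars.find tl sl = -1
  · simp [h]
  · simp only [h, ne_eq, not_false_eq_true, if_true, if_false]
    have hsi0 : 0 ≤ PySem.Chars.find tl sl := by
      have := PySem.Chars.neg_one_le_find tl sl; omega
    have hpref := (PySem.Chars.find_spec (s := tl) (sub := sl) hsi0).1
    have hlen : sl.length ≤ tl.length - (PySem.Chars.find tl sl).toNat := by
      have := hpref.length_le
      simpa using this
    set si := PySem.Chars.find tl sl with hsi
    have hsilen : si.toNat ≤ tl.length := by
      have := PySem.Chars.find_le_length tl sl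
      omega
    set stn : ℕ := si.toNat + sl.length with hstn
    have hstcast : si + (sl.length : ℤ) = (stn : ℤ) := by omega
    have hstle : stn ≤ tl.length := by omega
    rw [hstcast, PySem.List.slice_from (a := (stn : ℤ)) (xs := tl) (by positivity)]
    simp only [Int.toNat_natCast]
    set u := tl.drop stn with hu
    have hulen : u.length = tl.length - stn := by simp [hu]
    have hA := pvLoopA_eq u cl (stn : ℤ) (u.length + 1) 0 (Nat.zero_le _) (by omega)
    simp only [Nat.cast_zero, PySem.Chars.findFrom_zero, Nat.sub_zero] at hA
    rw [hA]
    -- B side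
    rw [PySem.List.pyRange_one]
    have hcnt : (((tl.length : ℤ) + 1) - (stn : ℤ)).toNat = u.length + 1 := by omega
    rw [hcnt, List.filter_map, List.range_eq_range']
    have hpq : ∀ x ∈ List.range' 0 (u.length + 1),
        ((fun i => PySem.Chars.startswith (List.drop i.toNat tl) cl) ∘ fun k : ℕ => (stn : ℤ) + (k : ℤ)) x
          = (fun i => PySem.Chars.startswith (List.drop i u) cl) x := by
      intro j hj
      simp only [Function.comp_apply]
      have h1 : ((stn : ℤ) + (j : ℤ)).toNat = stn + j := by omega
      rw [h1, hu, List.drop_drop]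
    rw [List.filter_congr hpq]

-- ===== VERDICT (by name: the statement is the Claim_ definition above) =====
theorem check_index_spec : Claim_equal_check_index := by
  intro text char_to_find separator _
  unfold Spec_check_index
  exact pv_eq text char_to_find separator
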